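-- pv_equiv track=rewrite | github.com/soob511/algostudy | 2023/0522_마법의 엘리베이터/PS_마법의 엘리베이터_이길상.py | count
-- ===== SOURCE A (Python) =====
-- def count(num, i):
--     big = (10**i)
--     small = (10**(i-1))
--
--     if num < big:
--         return min(num//small, 11-num//small)
--
--     rem = num%big
--     dist = rem//small
--
--     lo = num - rem
--     hi = lo + (10**i)
--
--     return min(count(lo, i+1)+dist, count(hi, i+1)+10-dist)
-- ===== SOURCE B (Python) =====
-- def count(num, i):
--     # Linear digit DP with a carry state over the digits of num // 10**(i-1):
--     # a = best cost so far with no carry into the next digit,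
--     # b = best cost so far with a carry of +1 into the next digit.
--     n = num // 10 ** (i - 1)
--     a, b = 0, 11  # 11 acts as infinity: any genuine carry cost is smaller
--     while n > 0:
--         d = n % 10
--         a, b = min(a + d, b + d + 1), min(a + 10 - d, b + 9 - d)
--         n //= 10
--     return min(a, b + 1)
-- ===== Notes on version B (the rewrite author's own statement) =====
-- stated objective: faster
-- what changed: Replaced A's exponential branching recursion (two recursive calls per digit position) by a single linear digit DP that keeps just two accumulators (best cost without / with a carry into the next digit).
-- outside the precondition, e.g. on count(5, 0): A returns 5.0, B returns 6; on count(-5, 1): A returns -5, B returns 0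
import Mathlib
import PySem

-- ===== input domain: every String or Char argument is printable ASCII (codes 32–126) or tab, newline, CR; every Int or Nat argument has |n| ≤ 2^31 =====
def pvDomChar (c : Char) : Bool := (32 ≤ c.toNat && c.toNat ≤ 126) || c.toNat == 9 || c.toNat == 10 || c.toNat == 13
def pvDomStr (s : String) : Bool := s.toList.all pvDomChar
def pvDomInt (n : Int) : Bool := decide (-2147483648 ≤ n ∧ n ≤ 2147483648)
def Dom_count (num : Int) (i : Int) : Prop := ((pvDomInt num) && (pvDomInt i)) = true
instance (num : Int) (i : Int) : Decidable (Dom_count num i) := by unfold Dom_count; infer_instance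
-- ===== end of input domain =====

-- B replaces A's exponential two-way recursion by a single linear digit DP with a carry state
-- (objective: faster); return-value equivalence on Pre_ (num ≥ 0, i ≥ 1).


-- ===== PORT A =====
-- termination measure helper: used only by count's decreasing_by
lemma pv_child_lt (num i : Int) (h : ¬ num < 10 ^ i.toNat) (hi : 1 ≤ i) (c : Int)
    (hc : c = num - num % 10 ^ i.toNat ∨ c = num - num % 10 ^ i.toNat + 10 ^ i.toNat) :
    (c / 10 ^ (i + 1).toNat).toNat < (num / 10 ^ i.toNat).toNat := by
  push_neg at h
  set b : Int := 10 ^ i.toNat with hb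
  have hbpos : (0:Int) < b := by positivity
  have hq1 : 1 ≤ num / b := by
    rw [Int.le_ediv_iff_mul_le hbpos]; omega
  have hpow : (10:Int) ^ (i + 1).toNat = b * 10 := by
    rw [hb, ← pow_succ]
    congr 1
    omega
  have hdef : num % b = num - b * (num / b) := by rw [Int.emod_def]
  have h1 : (b * (num / b)) / (b * 10) = (num / b) / 10 := Int.mul_ediv_mul_of_pos _ _ hbpos
  have h2 : (b * (num / b + 1)) / (b * 10) = (num / b + 1) / 10 := Int.mul_ediv_mul_of_pos _ _ hbpos
  rcases hc with hc | hc
  · have hc' : c = b * (num / b) := by omega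
    rw [hc', hpow, h1]; omega
  · have hmul : b * (num / b + 1) = b * (num / b) + b := by ring
    have hc' : c = b * (num / b + 1) := by omega
    rw [hc', hpow, h2]; omega

def count (num : Int) (i : Int) : Int :=
  let big : Int := 10 ^ i.toNat
  let small : Int := 10 ^ (i - 1).toNat
  if num < big then
    min (PySem.Int.floordiv num small) (11 - PySem.Int.floordiv num small)
  else
    let rem := PySem.Int.mod num big
    let dist := PySem.Int.floordiv rem small
    let lo := num - rem
    let hi := lo + 10 ^ i.toNat
    min (count lo (i + 1) + dist) (count hi (i + 1) + 10 - dist)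
termination_by ((1 - i).toNat, (num / 10 ^ i.toNat).toNat)
decreasing_by
  all_goals
    by_cases hicase : 1 ≤ i
  case pos =>
    apply Prod.Lex.right'
    · omega
    · have hm := PySem.Int.mod_eq_emod_of_pos (a := num) (b := (10:Int) ^ i.toNat) (by positivity)
      apply pv_child_lt num i (by omega) hicase
      rw [← hm]
      left; rfl
  case neg =>
    apply Prod.Lex.left
    omega
  case pos =>
    apply Prod.Lex.right'
    · omega
    · have hm := PySem.Int.mod_eq_emod_of_pos (a := num) (b := (10:Int) ^ i.toNat) (by positivity)
      apply pv_child_lt num i (by omega) hicase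
      rw [← hm]
      right; rfl
  case neg =>
    apply Prod.Lex.left
    omega

-- ===== PORT B =====
-- the while loop of Source B: state (a, b) = best cost so far without / with a carry into the next digit
def pvLoop (n a b : Int) : Int :=
  if 0 < n then
    pvLoop (PySem.Int.floordiv n 10)
      (min (a + PySem.Int.mod n 10) (b + PySem.Int.mod n 10 + 1))
      (min (a + 10 - PySem.Int.mod n 10) (b + 9 - PySem.Int.mod n 10))
  else
    min a (b + 1)
termination_by n.toNat
decreasing_by
  rw [PySem.Int.floordiv_eq_ediv_of_pos (by omega : (0:Int) < 10)]
  omega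

def count_alt (num : Int) (i : Int) : Int :=
  let n := PySem.Int.floordiv num (10 ^ (i - 1).toNat)
  pvLoop n 0 11

-- ===== PRECONDITION & SPEC =====
-- Pre_ excludes i ≤ 0, where A returns a float (10**(i-1) is fractional), and num < 0, where
-- A's base case returns the negative floor quotient num // 10**(i-1) — not a press count; this
-- corner lies outside the problem's storey domain and B returns 0 there.
def Pre_count (num : Int) (i : Int) : Prop := 1 ≤ i ∧ 0 ≤ num
instance (num : Int) (i : Int) : Decidable (Pre_count num i) := by unfold Pre_count; infer_instance
def pvWitness_count : Int × Int := (2023, 1)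

def Spec_count (num : Int) (i : Int) (out : Int) : Prop := out = count_alt num i
instance (num : Int) (i : Int) (out : Int) : Decidable (Spec_count num i out) := by unfold Spec_count; infer_instance

-- ===== CLAIM (what is proved, stated in full; the proofs are below) =====
def Claim_equal_count : Prop := ∀ (num : Int) (i : Int), Dom_count num i → Pre_count num i → Spec_count num i (count num i)

-- ===== LEMMAS AND PROOFS =====

-- the per-position cost function: pvG n = minimum presses for storey n (digits of n)
def pvG (n : Nat) : Int :=
  if n < 10 then
    min (n : Int) (11 - n)
  else
    min ((n % 10 : Nat) + pvG (n / 10)) ((10 : Int) - (n % 10 : Nat) + pvG (n / 10 + 1))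
termination_by n
decreasing_by all_goals omega

lemma pvG_zero : pvG 0 = 0 := by rw [pvG]; norm_num

lemma pvG_one : pvG 1 = 1 := by rw [pvG]; norm_num

lemma pvG_rec (n : Nat) (h : 1 ≤ n) :
    pvG n = min ((n % 10 : Nat) + pvG (n / 10)) ((10 : Int) - (n % 10 : Nat) + pvG (n / 10 + 1)) := by
  by_cases h10 : n < 10
  · have hm : n % 10 = n := Nat.mod_eq_of_lt h10
    have hd : n / 10 = 0 := Nat.div_eq_of_lt h10
    rw [pvG, if_pos h10, hm, hd, pvG_zero, pvG_one]
    simp only [min_def]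
    split_ifs <;> omega
  · rw [pvG, if_neg h10]

lemma pvG_lip (n : Nat) : pvG (n + 1) ≤ pvG n + 1 ∧ pvG n ≤ pvG (n + 1) + 1 := by
  induction n using Nat.strong_induction_on with
  | _ n ih =>
    rcases Nat.eq_zero_or_pos n with rfl | hn
    · rw [pvG_zero, pvG_one]; omega
    · have hrec := pvG_rec n hn
      by_cases hd : n % 10 ≤ 8
      · have h1 : (n + 1) % 10 = n % 10 + 1 := by omega
        have h2 : (n + 1) / 10 = n / 10 := by omega
        have hrec1 := pvG_rec (n + 1) (by omega)
        rw [h1, h2] at hrec1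
        rw [hrec, hrec1]
        constructor <;> (simp only [min_def]; split_ifs <;> omega)
      · have h9 : n % 10 = 9 := by omega
        have h1 : (n + 1) % 10 = 0 := by omega
        have h2 : (n + 1) / 10 = n / 10 + 1 := by omega
        have hrec1 := pvG_rec (n + 1) (by omega)
        rw [h1, h2] at hrec1
        have ihm := ih (n / 10) (by omega)
        have ihm1 := ih (n / 10 + 1) (by omega)
        rw [hrec, hrec1, h9]
        push_cast
        constructor <;> (simp only [min_def]; split_ifs <;> omega)

lemma pvG_succ (n : Nat) (h : 1 ≤ n) :
    pvG (n + 1) = min ((n % 10 : Nat) + 1 + pvG (n / 10)) ((9 : Int) - (n % 10 : Nat) + pvG (n / 10 + 1)) := by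
  by_cases hd : n % 10 ≤ 8
  · have h1 : (n + 1) % 10 = n % 10 + 1 := by omega
    have h2 : (n + 1) / 10 = n / 10 := by omega
    have hrec1 := pvG_rec (n + 1) (by omega)
    rw [h1, h2] at hrec1
    rw [hrec1]
    push_cast
    simp only [min_def]
    split_ifs <;> omega
  · have h9 : n % 10 = 9 := by omega
    have h1 : (n + 1) % 10 = 0 := by omega
    have h2 : (n + 1) / 10 = n / 10 + 1 := by omega
    have hrec1 := pvG_rec (n + 1) (by omega)
    rw [h1, h2] at hrec1
    have l1 := pvG_lip (n / 10)
    have l2 := pvG_lip (n / 10 + 1)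
    rw [hrec1, h9]
    push_cast
    simp only [min_def]
    split_ifs <;> omega

lemma pvLoop_eq (k : Nat) : ∀ (n a b : Int), 0 ≤ n → n.toNat ≤ k →
    pvLoop n a b = min (a + pvG n.toNat) (b + pvG (n.toNat + 1)) := by
  induction k with
  | zero =>
    intro n a b hn hk
    have hz : n = 0 := by omega
    subst hz
    rw [pvLoop]
    norm_num [pvG_zero, pvG_one]
  | succ k ih =>
    intro n a b hn hk
    by_cases hpos : 0 < n
    · rw [pvLoop, if_pos hpos]
      have h10 : (0:Int) < 10 := by omega
      rw [PySem.Int.floordiv_eq_ediv_of_pos h10, PySem.Int.mod_eq_emod_of_pos (a := n) h10]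
      have hdiv0 : 0 ≤ n / 10 := Int.ediv_nonneg (by omega) (by omega)
      have htn : (n / 10).toNat = n.toNat / 10 := by omega
      have hk' : (n / 10).toNat ≤ k := by omega
      rw [ih _ _ _ hdiv0 hk']
      have hmod : n % 10 = ((n.toNat % 10 : Nat) : Int) := by omega
      rw [htn, hmod]
      have hn1 : 1 ≤ n.toNat := by omega
      rw [pvG_rec n.toNat hn1, pvG_succ n.toNat hn1]
      simp only [min_def]
      split_ifs <;> omega
    · have hz : n = 0 := by omega
      subst hz
      rw [pvLoop]
      norm_num [pvG_zero, pvG_one]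

-- the base case of count, shared by both induction cases below
lemma count_base (num i : Int) (hi : 1 ≤ i) (hnum : 0 ≤ num) (hlt : num < 10 ^ i.toNat) :
    count num i = pvG ((num / 10 ^ (i - 1).toNat).toNat) := by
  have hspos : (0:Int) < 10 ^ (i - 1).toNat := by positivity
  have hpow : (10:Int) ^ i.toNat = 10 ^ (i - 1).toNat * 10 := by
    rw [← pow_succ]; congr 1; omega
  have hn0 : 0 ≤ num / 10 ^ (i - 1).toNat := Int.ediv_nonneg hnum (le_of_lt hspos)
  have hn10 : num / 10 ^ (i - 1).toNat < 10 := by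
    rw [Int.ediv_lt_iff_lt_mul hspos]; omega
  rw [count]
  simp only [if_pos hlt]
  rw [PySem.Int.floordiv_eq_ediv_of_pos hspos]
  rw [pvG, if_pos (by omega : (num / 10 ^ (i - 1).toNat).toNat < 10)]
  have hcast : (((num / 10 ^ (i - 1).toNat).toNat : Int)) = num / 10 ^ (i - 1).toNat :=
    Int.toNat_of_nonneg hn0
  rw [hcast]

lemma count_eq_pvG (k : Nat) : ∀ (num i : Int), 1 ≤ i → 0 ≤ num →
    (num / 10 ^ i.toNat).toNat ≤ k →
    count num i = pvG ((num / 10 ^ (i - 1).toNat).toNat) := by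
  induction k with
  | zero =>
    intro num i hi hnum hk
    have hbpos : (0:Int) < 10 ^ i.toNat := by positivity
    by_cases hlt : num < 10 ^ i.toNat
    · exact count_base num i hi hnum hlt
    · exfalso
      have : 1 ≤ num / 10 ^ i.toNat := by
        rw [Int.le_ediv_iff_mul_le hbpos]; omega
      omega
  | succ k ih =>
    intro num i hi hnum hk
    by_cases hlt : num < 10 ^ i.toNat
    · exact count_base num i hi hnum hlt
    · -- recursive case
      have hspos : (0:Int) < 10 ^ (i - 1).toNat := by positivity
      have hbpos : (0:Int) < 10 ^ i.toNat := by positivity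
      have hpow : (10:Int) ^ i.toNat = 10 ^ (i - 1).toNat * 10 := by
        rw [← pow_succ]; congr 1; omega
      have hpow1 : (10:Int) ^ (i + 1).toNat = 10 ^ i.toNat * 10 := by
        rw [← pow_succ]; congr 1; omega
      rw [count]
      simp only [if_neg hlt]
      rw [PySem.Int.mod_eq_emod_of_pos (a := num) hbpos]
      rw [PySem.Int.floordiv_eq_ediv_of_pos hspos]
      -- abbreviations (as equations, so omega and rw can use them)
      have hq1 : 1 ≤ num / 10 ^ i.toNat := by
        rw [Int.le_ediv_iff_mul_le hbpos]; omega
      have hrdef : num % 10 ^ i.toNat = num - 10 ^ i.toNat * (num / 10 ^ i.toNat) := by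
        rw [Int.emod_def]
      have hr0 : 0 ≤ num % 10 ^ i.toNat := Int.emod_nonneg num (by omega)
      have hrlt : num % 10 ^ i.toNat < 10 ^ i.toNat := Int.emod_lt_of_pos num hbpos
      have hlo : num - num % 10 ^ i.toNat = 10 ^ i.toNat * (num / 10 ^ i.toNat) := by omega
      have hmul : (10:Int) ^ i.toNat * (num / 10 ^ i.toNat + 1)
          = 10 ^ i.toNat * (num / 10 ^ i.toNat) + 10 ^ i.toNat := by ring
      have hhi : num - num % 10 ^ i.toNat + 10 ^ i.toNat
          = 10 ^ i.toNat * (num / 10 ^ i.toNat + 1) := by omega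
      -- the children divided by the NEXT level's small = 10 ^ i.toNat
      have hloq : (num - num % 10 ^ i.toNat) / 10 ^ i.toNat = num / 10 ^ i.toNat := by
        rw [hlo, Int.mul_ediv_cancel_left _ (by omega : (10:Int) ^ i.toNat ≠ 0)]
      have hhiq : (num - num % 10 ^ i.toNat + 10 ^ i.toNat) / 10 ^ i.toNat
          = num / 10 ^ i.toNat + 1 := by
        rw [hhi, Int.mul_ediv_cancel_left _ (by omega : (10:Int) ^ i.toNat ≠ 0)]
      -- the children's measures at level i+1
      have hlom : (num - num % 10 ^ i.toNat) / 10 ^ (i + 1).toNat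
          = num / 10 ^ i.toNat / 10 := by
        rw [hpow1, hlo, Int.mul_ediv_mul_of_pos _ _ hbpos]
      have hhim : (num - num % 10 ^ i.toNat + 10 ^ i.toNat) / 10 ^ (i + 1).toNat
          = (num / 10 ^ i.toNat + 1) / 10 := by
        rw [hpow1, hhi, Int.mul_ediv_mul_of_pos _ _ hbpos]
      -- apply the induction hypothesis to both children
      have hcl : count (num - num % 10 ^ i.toNat) (i + 1)
          = pvG (((num - num % 10 ^ i.toNat) / 10 ^ (i + 1 - 1).toNat).toNat) :=
        ih _ _ (by omega) (by omega) (by rw [hlom]; omega)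
      have hch : count (num - num % 10 ^ i.toNat + 10 ^ i.toNat) (i + 1)
          = pvG (((num - num % 10 ^ i.toNat + 10 ^ i.toNat) / 10 ^ (i + 1 - 1).toNat).toNat) :=
        ih _ _ (by omega) (by omega) (by rw [hhim]; omega)
      simp only [add_sub_cancel_right] at hcl hch
      rw [hcl, hch, hloq, hhiq]
      -- identify q with n / 10 and dist with n % 10, where n = num / 10 ^ (i-1).toNat
      have hqq : num / 10 ^ i.toNat = num / 10 ^ (i - 1).toNat / 10 := by
        rw [hpow, Int.ediv_ediv_of_nonneg (le_of_lt hspos)]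
      have hdist : num % 10 ^ i.toNat / 10 ^ (i - 1).toNat
          = num / 10 ^ (i - 1).toNat - 10 * (num / 10 ^ i.toNat) := by
        have e1 : num % 10 ^ i.toNat
            = num + 10 ^ (i - 1).toNat * (-(10 * (num / 10 ^ i.toNat))) := by
          rw [hrdef, hpow]; ring
        rw [e1, Int.add_mul_ediv_left _ _ (by omega : (10:Int) ^ (i - 1).toNat ≠ 0)]
        ring
      have hn0 : 0 ≤ num / 10 ^ (i - 1).toNat := Int.ediv_nonneg hnum (le_of_lt hspos)
      have hn10 : 10 ≤ num / 10 ^ (i - 1).toNat := by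
        rw [Int.le_ediv_iff_mul_le hspos]; omega
      have hqt : (num / 10 ^ i.toNat).toNat = (num / 10 ^ (i - 1).toNat).toNat / 10 := by
        omega
      have hq1t : (num / 10 ^ i.toNat + 1).toNat = (num / 10 ^ (i - 1).toNat).toNat / 10 + 1 := by
        omega
      have hdt : num % 10 ^ i.toNat / 10 ^ (i - 1).toNat
          = (((num / 10 ^ (i - 1).toNat).toNat % 10 : Nat) : Int) := by
        omega
      rw [hqt, hq1t, hdt]
      rw [pvG_rec ((num / 10 ^ (i - 1).toNat).toNat) (by omega)]
      simp only [min_def]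
      split_ifs <;> omega

-- ===== VERDICT (by name: the statement is the Claim_ definition above) =====
theorem count_spec : Claim_equal_count := by
  intro num i _ hpre
  obtain ⟨hi, hnum⟩ := hpre
  unfold Spec_count
  show count num i = pvLoop (PySem.Int.floordiv num (10 ^ (i - 1).toNat)) 0 11
  have hspos : (0:Int) < 10 ^ (i - 1).toNat := by positivity
  have hn0 : 0 ≤ num / 10 ^ (i - 1).toNat := Int.ediv_nonneg hnum (le_of_lt hspos)
  rw [PySem.Int.floordiv_eq_ediv_of_pos hspos]
  rw [count_eq_pvG (num / 10 ^ i.toNat).toNat num i hi hnum le_rfl]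
  rw [pvLoop_eq (num / 10 ^ (i - 1).toNat).toNat _ 0 11 hn0 le_rfl]
  have hlip := pvG_lip (num / 10 ^ (i - 1).toNat).toNat
  simp only [min_def]
  split_ifs <;> omega
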